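-- pv_equiv track=rewrite | github.com/mengchheanglong/directive-workspace | runtime/source-packs/desloppify/desloppify/languages/typescript/fixers/import_rewrite.py | _collect_import_statement
-- ===== SOURCE A (Python) =====
-- def _collect_import_statement(lines: list[str], start: int) -> tuple[list[str], int]:
--     import_lines = [lines[start]]
--     idx = start
--     while not _is_import_complete("".join(import_lines)):
--         idx += 1
--         if idx >= len(lines):
--             break
--         import_lines.append(lines[idx])
--     return import_lines, idx
--
-- def _is_import_complete(text: str) -> bool:
--     stripped = text.strip()
--     if stripped.endswith(";"):
--         return True
--     if "from " not in stripped: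
--         return False
--     trailing = stripped.split("from ", 1)[-1].strip()
--     if (trailing.startswith("'") and trailing.count("'") >= 2) or (
--         trailing.startswith('"') and trailing.count('"') >= 2
--     ):
--         return True
--     return False
-- ===== SOURCE B (Python) =====
-- # One forward pass: appends lines while maintaining an O(1)-updatable scan state
-- # (last non-space char, 4-char window, first-"from "-clause quote info) instead of
-- # re-joining and re-scanning the whole statement for every new line.
--
-- _WS = " \t\n\r\v\f"
--
--
-- def _step(st, c):
--     last, w, phase, trail, c1, c2 = st
--     if phase == 2:
--         if c == "'":
--             c1 += 1
--         elif c == '"':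
--             c2 += 1
--     elif phase == 1:
--         if c not in _WS:
--             phase = 2
--             trail = c
--             c1 = 1 if c == "'" else 0
--             c2 = 1 if c == '"' else 0
--     else:
--         if (w + c).endswith("from "):
--             phase = 1
--     w = (w + c)[-4:]
--     if c not in _WS:
--         last = c
--     return (last, w, phase, trail, c1, c2)
--
--
-- def _scan(st, line):
--     for c in line:
--         st = _step(st, c)
--     return st
--
--
-- def _done(st):
--     last, _w, phase, trail, c1, c2 = st
--     if last == ";":
--         return True
--     return phase == 2 and ((trail == "'" and c1 >= 2) or (trail == '"' and c2 >= 2))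
--
--
-- def _collect_import_statement(lines: list[str], start: int) -> tuple[list[str], int]:
--     import_lines = [lines[start]]
--     idx = start
--     st = _scan(("", "", 0, "", 0, 0), lines[start])
--     while not _done(st):
--         idx += 1
--         if idx >= len(lines):
--             break
--         import_lines.append(lines[idx])
--         st = _scan(st, lines[idx])
--     return import_lines, idx
-- ===== Notes on version B (the rewrite author's own statement) =====
-- stated objective: faster
-- what changed: Instead of re-joining all collected lines and re-scanning the whole joined statement with the completeness check after every appended line (quadratic in statement length), B makes a single forward pass that feeds each line once into an O(1)-updatable scan state (last non-space character, 4-char window for detecting 'from ' across line boundaries, and the quote counts / first trailing character of the first 'from '-clause), deciding completeness from that state.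
import Mathlib
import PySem

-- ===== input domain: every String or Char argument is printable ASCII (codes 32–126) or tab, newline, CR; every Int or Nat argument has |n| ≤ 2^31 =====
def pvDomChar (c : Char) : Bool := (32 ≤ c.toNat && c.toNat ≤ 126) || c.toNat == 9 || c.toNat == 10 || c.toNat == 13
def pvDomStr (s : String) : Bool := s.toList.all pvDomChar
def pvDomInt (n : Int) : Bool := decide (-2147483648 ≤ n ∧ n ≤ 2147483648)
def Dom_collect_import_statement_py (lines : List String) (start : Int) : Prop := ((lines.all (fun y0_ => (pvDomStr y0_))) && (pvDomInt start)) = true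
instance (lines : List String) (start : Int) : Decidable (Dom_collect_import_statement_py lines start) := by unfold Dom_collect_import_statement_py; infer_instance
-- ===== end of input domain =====

-- B replaces A's re-join + full re-scan per appended line by a single forward pass that
-- keeps an O(1)-updatable scan state (last non-space char, 4-char window, quote counts of
-- the first "from "-clause); return value proved equal on Pre_ (A raises IndexError outside).

-- ===== PORT A =====

-- port of _is_import_complete
def pvIsImportComplete (text : String) : Bool :=
  let stripped := PySem.Str.strip text
  if PySem.Str.endswith stripped ";" then true
  else if !(PySem.Str.isIn "from " stripped) then false
  else
    -- stripped.split("from ", 1)[-1].strip(); split(sep, 1) is never empty, so [-1] never raises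
    let trailing := PySem.Str.strip (((PySem.List.pyGet? ((PySem.Str.splitMax? stripped "from " 1).getD []) (-1)).getD ""))
    if (PySem.Str.startswith trailing "'" && decide (2 ≤ PySem.Str.count trailing "'")) ||
       (PySem.Str.startswith trailing "\"" && decide (2 ≤ PySem.Str.count trailing "\"")) then true
    else false

-- the while-loop of _collect_import_statement
def pvLoopA (lines : List String) (acc : List String) (idx : Int) : List String × Int :=
  if pvIsImportComplete (PySem.Str.join "" acc) then (acc, idx)
  else
    if _h : ((lines.length : Int)) ≤ idx + 1 then (acc, idx + 1)
    else
      match PySem.List.pyGet? lines (idx + 1) with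
      | some l => pvLoopA lines (acc ++ [l]) (idx + 1)
      | none => (acc, idx + 1)   -- unreachable under Pre_ (idx+1 > -len here)
termination_by ((lines.length : Int) - idx).toNat
decreasing_by omega

def collect_import_statement_py (lines : List String) (start : Int) : List String × Int :=
  match PySem.List.pyGet? lines start with
  | some first => pvLoopA lines [first] start
  | none => ([], start)   -- lines[start] raises IndexError: excluded by Pre_

-- ===== PORT B =====

-- _WS = " \t\n\r\v\f"
def pvWsStr : String := " \t\n\r\u000B\u000C"

-- the state tuple (last, w, phase, trail, c1, c2) of Source B
structure PvScanSt where
  last : List Char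
  w : List Char
  phase : Int
  trail : List Char
  c1 : Int
  c2 : Int
deriving DecidableEq, Repr

-- _step; 'c not in _WS' on a 1-char c is membership of c among _WS's characters
def pvStepB (st : PvScanSt) (c : Char) : PvScanSt :=
  let notWs := !(pvWsStr.toList.contains c)
  let s2 :=
    if st.phase == 2 then
      if c == '\'' then { st with c1 := st.c1 + 1 }
      else if c == '"' then { st with c2 := st.c2 + 1 }
      else st
    else if st.phase == 1 then
      if notWs then
        { st with phase := 2, trail := [c],
                  c1 := if c == '\'' then 1 else 0,
                  c2 := if c == '"' then 1 else 0 }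
      else st
    else
      if PySem.Chars.endswith (st.w ++ [c]) "from ".toList then { st with phase := 1 }
      else st
  { s2 with w := PySem.Chars.slice (st.w ++ [c]) (some (-4)) none,
            last := if notWs then [c] else st.last }

-- _scan
def pvScanB (st : PvScanSt) (line : String) : PvScanSt := line.toList.foldl pvStepB st

-- initial state ("", "", 0, "", 0, 0)
def pvInitSt : PvScanSt := ⟨[], [], 0, [], 0, 0⟩

-- _done
def pvDoneB (st : PvScanSt) : Bool :=
  if st.last == [';'] then true
  else st.phase == 2 &&
    ((st.trail == ['\''] && decide (2 ≤ st.c1)) || (st.trail == ['"'] && decide (2 ≤ st.c2)))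

-- the while-loop of Source B's _collect_import_statement
def pvLoopB (lines : List String) (acc : List String) (st : PvScanSt) (idx : Int) : List String × Int :=
  if pvDoneB st then (acc, idx)
  else
    if _h : ((lines.length : Int)) ≤ idx + 1 then (acc, idx + 1)
    else
      match PySem.List.pyGet? lines (idx + 1) with
      | some l => pvLoopB lines (acc ++ [l]) (pvScanB st l) (idx + 1)
      | none => (acc, idx + 1)   -- unreachable under Pre_
termination_by ((lines.length : Int) - idx).toNat
decreasing_by omega

def collect_import_statement_py_alt (lines : List String) (start : Int) : List String × Int :=
  match PySem.List.pyGet? lines start with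
  | some first => pvLoopB lines [first] (pvScanB pvInitSt first) start
  | none => ([], start)   -- lines[start] raises IndexError: excluded by Pre_

-- ===== PRECONDITION & SPEC =====

-- Pre_ excludes exactly the inputs where lines[start] raises IndexError (start out of range).
def Pre_collect_import_statement_py (lines : List String) (start : Int) : Prop :=
  -(lines.length : Int) ≤ start ∧ start < (lines.length : Int)
instance (lines : List String) (start : Int) : Decidable (Pre_collect_import_statement_py lines start) := by unfold Pre_collect_import_statement_py; infer_instance

def pvWitness_collect_import_statement_py : List String × Int := (["import x;"], 0)

def Spec_collect_import_statement_py (lines : List String) (start : Int) (out : List String × Int) : Prop := out = collect_import_statement_py_alt lines start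
instance (lines : List String) (start : Int) (out : List String × Int) : Decidable (Spec_collect_import_statement_py lines start out) := by unfold Spec_collect_import_statement_py; infer_instance

-- ===== CLAIM (what is proved, stated in full; the proofs are below) =====
def Claim_equal_collect_import_statement_py : Prop := ∀ (lines : List String) (start : Int), Dom_collect_import_statement_py lines start → Pre_collect_import_statement_py lines start → Spec_collect_import_statement_py lines start (collect_import_statement_py lines start)

-- ===== LEMMAS AND PROOFS =====

-- abbreviations used only by the proofs
def pvFROM : List Char := ['f', 'r', 'o', 'm', ' ']

def pvWs (c : Char) : Bool := PySem.Chars.isspace c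

-- an occurrence of "from " at position p
def pvOcc (cs : List Char) (p : Nat) : Prop := pvFROM <+: cs.drop p

def pvMinOcc (cs : List Char) (p : Nat) : Prop := pvOcc cs p ∧ ∀ q < p, ¬ pvOcc cs q

-- the invariant tying Source B's scan state to the scanned text
def pvInv (cs : List Char) (st : PvScanSt) : Prop :=
  st.w = cs.drop (cs.length - 4) ∧
  st.last = (match (cs.filter (fun c => !pvWs c)).getLast? with
             | some c => [c] | none => []) ∧
  ((st.phase = 0 ∧ st.trail = [] ∧ st.c1 = 0 ∧ st.c2 = 0 ∧ ∀ p, ¬ pvOcc cs p) ∨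
   (∃ p, pvMinOcc cs p ∧
     ((st.phase = 1 ∧ st.trail = [] ∧ st.c1 = 0 ∧ st.c2 = 0 ∧
        (cs.drop (p + 5)).all pvWs = true) ∨
      (st.phase = 2 ∧
        (∃ dh dt, (cs.drop (p + 5)).dropWhile pvWs = dh :: dt ∧ st.trail = [dh]) ∧
        st.c1 = ((cs.drop (p + 5)).count '\'' : Int) ∧
        st.c2 = ((cs.drop (p + 5)).count '"' : Int)))))

theorem pvOcc_length {cs : List Char} {p : Nat} (h : pvOcc cs p) : p + 5 ≤ cs.length := by
  have h1 := h.length_le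
  simp [pvFROM, List.length_drop] at h1
  omega

theorem pvOcc_head {cs : List Char} {p : Nat} (h : pvOcc cs p) : (cs.drop p).head? = some 'f' := by
  obtain ⟨t, ht⟩ := h
  rw [← ht]; rfl

theorem pv_no_overlap {cs : List Char} {p q : Nat} (hp : pvOcc cs p) (hq : pvOcc cs q)
    (h1 : p < q) (h2 : q < p + 5) : False := by
  obtain ⟨t, ht⟩ := hp
  have hd : cs.drop q = (cs.drop p).drop (q - p) := by rw [List.drop_drop]; congr 1; omega
  have hh : (cs.drop q).head? = some 'f' := pvOcc_head hq
  rw [hd, ← ht] at hh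
  have hk : q - p = 1 ∨ q - p = 2 ∨ q - p = 3 ∨ q - p = 4 := by omega
  rcases hk with h|h|h|h <;> rw [h] at hh <;> simp [pvFROM] at hh

theorem pvOcc_concat {cs : List Char} {c : Char} {p : Nat} :
    pvOcc (cs ++ [c]) p ↔ pvOcc cs p ∨ (p + 5 = cs.length + 1 ∧ cs.drop p ++ [c] = pvFROM) := by
  unfold pvOcc
  by_cases hp : p ≤ cs.length
  · rw [List.drop_append_of_le_length hp, List.prefix_concat_iff]
    constructor
    · rintro (heq | hpre)
      · right
        have hl := congrArg List.length heq
        simp [pvFROM, List.length_drop] at hl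
        exact ⟨by omega, heq.symm⟩
      · left; exact hpre
    · rintro (hpre | ⟨hlen, heq⟩)
      · right; exact hpre
      · left; exact heq.symm
  · have hlen : (cs ++ [c]).length ≤ p := by simp; omega
    rw [List.drop_eq_nil_of_le hlen]
    have hlen2 : cs.length ≤ p := by omega
    rw [List.drop_eq_nil_of_le hlen2]
    constructor
    · intro h; rw [List.prefix_nil] at h; exact absurd h (by decide)
    · rintro (h | ⟨h, _⟩)
      · rw [List.prefix_nil] at h; exact absurd h (by decide)
      · omega

theorem pv_minOcc_concat {cs : List Char} {c : Char} {p : Nat} (h : pvMinOcc cs p) :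
    pvMinOcc (cs ++ [c]) p := by
  refine ⟨pvOcc_concat.mpr (Or.inl h.1), ?_⟩
  intro q hq hocc
  rcases pvOcc_concat.mp hocc with hold | ⟨hlen, _⟩
  · exact h.2 q hq hold
  · have := pvOcc_length h.1; omega

theorem pv_window {cs : List Char} {c : Char} (hno : ∀ p, ¬ pvOcc cs p) :
    (PySem.Chars.endswith (cs.drop (cs.length - 4) ++ [c]) pvFROM = true) ↔ ∃ p, pvOcc (cs ++ [c]) p := by
  rw [PySem.Chars.endswith_iff]
  constructor
  · intro hs
    have hlw : (cs.drop (cs.length - 4) ++ [c]).length ≤ 5 := by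
      simp [List.length_drop]; omega
    have heq := hs.eq_of_length_le (by simpa [pvFROM] using hlw)
    have hlen : cs.length - 4 + 5 = cs.length + 1 := by
      have := congrArg List.length heq
      simp [pvFROM, List.length_drop] at this
      omega
    refine ⟨cs.length - 4, ?_⟩
    rw [pvOcc_concat]
    exact Or.inr ⟨hlen, heq.symm⟩
  · rintro ⟨p, hp⟩
    rcases pvOcc_concat.mp hp with hold | ⟨hlen, heq⟩
    · exact absurd hold (hno p)
    · have hpe : p = cs.length - 4 := by omega
      rw [hpe] at heq; rw [heq]

theorem pv_slice_w (l : List Char) : PySem.Chars.slice l (some (-4)) none = l.drop (l.length - 4) := by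
  rw [PySem.Chars.slice_eq_listSlice]
  unfold PySem.List.slice PySem.List.clampIdx
  simp only
  split_ifs with h1 h2
  · rw [show l.length - 4 = 0 from by omega]
    simp
  · rw [show (↑l.length + (-4:Int)).toNat = l.length - 4 from by omega]
    apply List.take_of_length_le
    simp [List.length_drop]
  · omega

theorem pv_w_concat (cs : List Char) (c : Char) :
    (cs.drop (cs.length - 4) ++ [c]).drop ((cs.drop (cs.length - 4) ++ [c]).length - 4) =
    (cs ++ [c]).drop ((cs ++ [c]).length - 4) := by
  have h1 : cs.drop (cs.length - 4) ++ [c] = (cs ++ [c]).drop (cs.length - 4) :=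
    (List.drop_append_of_le_length (by omega)).symm
  rw [h1, List.drop_drop]
  congr 1
  simp [List.length_drop, List.length_append]
  omega


-- dropWhile head fails predicate
theorem pv_dropWhile_head {p : Char → Bool} {l : List Char} {c : Char} {t : List Char}
    (h : l.dropWhile p = c :: t) : p c = false := by
  have := List.head?_dropWhile_not p l
  rw [h] at this; simpa using this

-- dropWhile drops only p-elements; complement elements survive
theorem pv_takeWhile_all (p : Char → Bool) (l : List Char) : (l.takeWhile p).all p = true := by
  rw [List.all_eq_true]; exact fun x hx => List.mem_takeWhile_imp hx

theorem pv_lstrip_decomp (cs : List Char) :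
    cs = cs.takeWhile pvWs ++ PySem.Chars.lstrip cs ∧ (cs.takeWhile pvWs).all pvWs = true := by
  constructor
  · rw [PySem.Chars.lstrip]; exact (List.takeWhile_append_dropWhile).symm
  · exact pv_takeWhile_all _ _

theorem pv_rstrip_decomp (cs : List Char) :
    ∃ Q, cs = PySem.Chars.rstrip cs ++ Q ∧ Q.all pvWs = true := by
  refine ⟨(cs.reverse.takeWhile pvWs).reverse, ?_, ?_⟩
  · rw [PySem.Chars.rstrip]
    have : pvWs = PySem.Chars.isspace := rfl
    rw [← this, ← List.reverse_append, List.takeWhile_append_dropWhile, List.reverse_reverse]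
  · rw [List.all_eq_true]
    intro x hx
    rw [List.mem_reverse] at hx
    exact List.mem_takeWhile_imp hx

theorem pv_strip_decomp (cs : List Char) :
    ∃ P Q, cs = P ++ PySem.Chars.strip cs ++ Q ∧ P.all pvWs = true ∧ Q.all pvWs = true := by
  obtain ⟨h1, h2⟩ := pv_lstrip_decomp cs
  obtain ⟨Q, hq1, hq2⟩ := pv_rstrip_decomp (PySem.Chars.lstrip cs)
  refine ⟨cs.takeWhile pvWs, Q, ?_, h2, hq2⟩
  rw [PySem.Chars.strip, List.append_assoc, ← hq1]
  exact h1

-- rstrip is a prefix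
theorem pv_rstrip_prefix (l : List Char) : PySem.Chars.rstrip l <+: l := by
  rw [PySem.Chars.rstrip]
  have h := List.dropWhile_suffix (l := l.reverse) PySem.Chars.isspace
  have := h.reverse
  simpa using this

-- last element of rstrip / strip is non-ws
theorem pv_rstrip_getLast {l : List Char} {c : Char}
    (h : (PySem.Chars.rstrip l).getLast? = some c) : pvWs c = false := by
  rw [PySem.Chars.rstrip, List.getLast?_eq_head?_reverse, List.reverse_reverse] at h
  have := List.head?_dropWhile_not PySem.Chars.isspace l.reverse
  rw [h] at this; simpa [pvWs] using this

theorem pv_strip_getLast {l : List Char} {c : Char}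
    (h : (PySem.Chars.strip l).getLast? = some c) : pvWs c = false := by
  rw [PySem.Chars.strip] at h; exact pv_rstrip_getLast h

-- getLast? through dropWhile/filter
theorem pv_head?_dropWhile_eq_filter (p : Char → Bool) (l : List Char) :
    (l.dropWhile p).head? = (l.filter (fun c => !p c)).head? := by
  induction l with
  | nil => rfl
  | cons a t ih =>
    by_cases ha : p a
    · simp [List.dropWhile_cons, List.filter_cons, ha, ih]
    · simp [List.dropWhile_cons, List.filter_cons, ha]

theorem pv_filter_dropWhile (p : Char → Bool) (l : List Char) :
    (l.dropWhile p).filter (fun c => !p c) = l.filter (fun c => !p c) := by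
  induction l with
  | nil => rfl
  | cons a t ih =>
    by_cases ha : p a
    · simp [List.dropWhile_cons, List.filter_cons, ha, ih]
    · simp [List.dropWhile_cons, List.filter_cons, ha]

theorem pv_getLast?_strip (cs : List Char) :
    (PySem.Chars.strip cs).getLast? = (cs.filter (fun c => !pvWs c)).getLast? := by
  rw [PySem.Chars.strip, PySem.Chars.rstrip, List.getLast?_eq_head?_reverse, List.reverse_reverse,
    pv_head?_dropWhile_eq_filter, PySem.Chars.lstrip]
  show (List.filter _ (List.dropWhile pvWs cs).reverse).head? = _
  rw [show (fun c => !PySem.Chars.isspace c) = (fun c => !pvWs c) from rfl,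
    List.filter_reverse, List.head?_reverse, pv_filter_dropWhile]

theorem pv_endswith_single (s : List Char) (a : Char) :
    PySem.Chars.endswith s [a] = (s.getLast? == some a) := by
  rw [PySem.Chars.endswith, Bool.eq_iff_iff, List.isSuffixOf_iff_suffix, beq_iff_eq]
  constructor
  · rintro ⟨t, rfl⟩; simp [List.getLast?_append]
  · intro h
    cases s using List.reverseRecOn with
    | nil => simp at h
    | append_singleton t b =>
      rw [List.getLast?_concat] at h
      obtain rfl : b = a := by simpa using h
      exact ⟨t, rfl⟩

theorem pv_startswith_single (s : List Char) (a : Char) :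
    PySem.Chars.startswith s [a] = (s.head? == some a) := by
  rw [PySem.Chars.startswith, Bool.eq_iff_iff, List.isPrefixOf_iff_prefix, beq_iff_eq]
  constructor
  · rintro ⟨t, rfl⟩; simp
  · intro h
    cases s with
    | nil => simp at h
    | cons b t =>
      obtain rfl : b = a := by simpa using h
      exact ⟨t, rfl⟩

-- head? through a prefix
theorem pv_head?_of_prefix {l₁ l₂ : List Char} (h : l₁ <+: l₂) (hne : l₁ ≠ []) :
    l₂.head? = l₁.head? := by
  obtain ⟨t, rfl⟩ := h
  cases l₁ with
  | nil => exact absurd rfl hne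
  | cons a s => rfl

-- Chars.count with a single-character needle is List.count
theorem pv_count_go_single (q : Char) :
    ∀ (l : List Char) (fuel acc : Nat), l.length ≤ fuel →
      PySem.Chars.count.go [q] fuel l acc = acc + l.count q := by
  intro l
  induction l with
  | nil => intro fuel acc h; cases fuel <;> simp [PySem.Chars.count.go]
  | cons a t ih =>
    intro fuel acc h
    cases fuel with
    | zero => simp at h
    | succ f =>
      rw [PySem.Chars.count.go]
      by_cases ha : a = q
      · rw [if_pos (by simp [ha, List.isPrefixOf])]
        simp only [List.length_cons] at h
        rw [show List.drop [q].length (a :: t) = t from by simp]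
        rw [ih f (acc + 1) (by omega)]
        simp [List.count_cons, ha]; omega
      · rw [if_neg (by simp [List.isPrefixOf]; intro hq; exact absurd hq.symm ha)]
        simp only [List.length_cons] at h
        rw [ih f acc (by omega)]
        simp [List.count_cons, ha]

theorem pv_count_single (s : List Char) (q : Char) :
    PySem.Chars.count s [q] = s.count q := by
  rw [PySem.Chars.count, if_neg (by simp)]
  rw [pv_count_go_single q s s.length 0 (by omega)]
  omega


theorem pv_split_go_zero (sep : List Char) :
    ∀ (fuel : Nat) (l cur : List Char) (acc : List (List Char)),
      PySem.Chars.splitOnMax.go sep fuel 0 l cur acc = ((cur.reverse ++ l) :: acc).reverse := by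
  intro fuel l cur acc
  cases fuel with
  | zero => rw [PySem.Chars.splitOnMax.go]
  | succ f =>
    cases l with
    | nil => rw [PySem.Chars.splitOnMax.go]; simp; omega
    | cons a t => rw [PySem.Chars.splitOnMax.go]; simp

theorem pv_split_go_one_occ (sep : List Char) (hsep : sep ≠ []) :
    ∀ (l : List Char) (p : Nat) (fuel : Nat) (cur : List Char) (acc : List (List Char)),
      l.length ≤ fuel → (sep <+: l.drop p) → (∀ q < p, ¬ sep <+: l.drop q) →
      PySem.Chars.splitOnMax.go sep fuel 1 l cur acc =
        acc.reverse ++ [cur.reverse ++ l.take p, l.drop (p + sep.length)] := by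
  intro l
  induction l with
  | nil =>
    intro p fuel cur acc hf hocc hmin
    exfalso
    rw [List.drop_nil, List.prefix_nil] at hocc
    exact hsep hocc
  | cons a t ih =>
    intro p fuel cur acc hf hocc hmin
    cases fuel with
    | zero => simp at hf
    | succ f =>
      rw [PySem.Chars.splitOnMax.go]
      rw [if_neg (by omega)]
      cases p with
      | zero =>
        rw [if_pos (by rw [List.isPrefixOf_iff_prefix]; simpa using hocc)]
        rw [pv_split_go_zero]
        simp
      | succ n =>
        rw [if_neg (by
          rw [List.isPrefixOf_iff_prefix]
          have := hmin 0 (by omega)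
          simpa using this)]
        rw [ih n f (a :: cur) acc (by simp at hf; omega)
          (by simpa using hocc)
          (fun q hq => by
            have := hmin (q + 1) (by omega)
            simpa using this)]
        simp [List.take_succ_cons, List.drop_succ_cons]
        rw [show n + 1 + sep.length = (n + sep.length) + 1 from by omega, List.drop_succ_cons]

theorem pv_splitOnMax_occ (s sep : List Char) (hsep : sep ≠ []) (p : Nat)
    (hocc : sep <+: s.drop p) (hmin : ∀ q < p, ¬ sep <+: s.drop q) :
    PySem.Chars.splitOnMax s sep 1 = [s.take p, s.drop (p + sep.length)] := by
  rw [PySem.Chars.splitOnMax, if_neg (by omega)]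
  rw [show ((1:Int)).toNat = 1 from rfl]
  rw [pv_split_go_one_occ sep hsep s p (s.length + 1) [] [] (by omega) hocc hmin]
  simp


theorem pv_char_toNat_inj (a b : Char) (h : a.toNat = b.toNat) : a = b := by
  apply Char.ext; unfold Char.toNat at h; exact UInt32.toNat_inj.mp h

theorem pv_ws_eq (c : Char) (h : pvDomChar c = true) :
    pvWsStr.toList.contains c = PySem.Chars.isspace c := by
  have hl : pvWsStr.toList = [' ', '\t', '\n', '\r', '\u000B', '\u000C'] := by decide
  simp only [pvDomChar, Bool.or_eq_true, Bool.and_eq_true, decide_eq_true_eq, beq_iff_eq] at h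
  have he : ∀ a : Char, (c = a) ↔ (c.toNat = a.toNat) := fun a => ⟨fun h => h ▸ rfl, fun h => pv_char_toNat_inj _ _ h⟩
  rw [Bool.eq_iff_iff]
  simp only [hl, PySem.Chars.isspace, List.contains_eq_mem, List.mem_cons, List.not_mem_nil, or_false, he,
    Bool.or_eq_true, Bool.and_eq_true, decide_eq_true_eq]
  simp only [show (' ').toNat = 32 from rfl, show ('\t').toNat = 9 from rfl, show ('\n').toNat = 10 from rfl,
    show ('\r').toNat = 13 from rfl, show ('\u000B').toNat = 11 from rfl, show ('\u000C').toNat = 12 from rfl]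
  omega

-- last component helper
theorem pv_last_concat (cs : List Char) (c : Char) :
    ((cs ++ [c]).filter (fun c => !pvWs c)).getLast? =
      (if pvWs c then (cs.filter (fun c => !pvWs c)).getLast? else some c) := by
  rw [List.filter_append]
  by_cases hc : pvWs c
  · simp [List.filter, hc]
  · simp [List.filter, hc, List.getLast?_append]

theorem pv_count_ws_zero {t : List Char} (q : Char) (hq : pvWs q = false)
    (ht : t.all pvWs = true) : t.count q = 0 := by
  rw [List.count_eq_zero]
  intro hmem
  rw [List.all_eq_true] at ht
  exact absurd (ht q hmem) (by simp [hq])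

theorem pv_inv_step (cs : List Char) (c : Char) (st : PvScanSt)
    (hdom : pvDomChar c = true) (h : pvInv cs st) : pvInv (cs ++ [c]) (pvStepB st c) := by
  obtain ⟨hw, hlast, hph⟩ := h
  have hwsc : pvWsStr.toList.contains c = pvWs c := pv_ws_eq c hdom
  have hF : "from ".toList = pvFROM := by decide
  unfold pvStepB
  simp only [hwsc, hF]
  refine ⟨?_, ?_, ?_⟩
  · -- w component
    simp only [hw, pv_slice_w]
    rw [pv_w_concat]
  · -- last component
    simp only [hlast]
    by_cases hc : pvWs c <;>
      simp [pv_last_concat, hc]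
  · -- phase component
    rcases hph with ⟨hp0, htr, hc1, hc2, hno⟩ | ⟨p, hmin, hsub⟩
    · -- phase 0
      rw [hp0]
      simp only [show ((0:Int) == 2) = false from rfl, show ((0:Int) == 1) = false from rfl,
        Bool.false_eq_true, if_false, hw]
      by_cases hE : PySem.Chars.endswith (cs.drop (cs.length - 4) ++ [c]) pvFROM = true
      · rw [if_pos hE]
        obtain ⟨p, hp⟩ := (pv_window hno).mp hE
        have hnew : p + 5 = cs.length + 1 := by
          rcases pvOcc_concat.mp hp with hold | ⟨hlen, _⟩
          · exact absurd hold (hno p)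
          · exact hlen
        refine Or.inr ⟨p, ⟨hp, ?_⟩, Or.inl ⟨rfl, htr, hc1, hc2, ?_⟩⟩
        · intro q hq hocc
          rcases pvOcc_concat.mp hocc with hold | ⟨hlen, _⟩
          · exact absurd hold (hno q)
          · omega
        · rw [List.drop_eq_nil_of_le (by simp; omega)]
          rfl
      · rw [if_neg hE]
        refine Or.inl ⟨hp0, htr, hc1, hc2, ?_⟩
        intro p hocc
        exact hE ((pv_window hno).mpr ⟨p, hocc⟩)
    · have hplen : p + 5 ≤ cs.length := pvOcc_length hmin.1
      have hdropc : (cs ++ [c]).drop (p + 5) = cs.drop (p + 5) ++ [c] :=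
        List.drop_append_of_le_length hplen
      rcases hsub with ⟨hp1, htr, hc1, hc2, hallws⟩ | ⟨hp2, ⟨dh, dt, hdw, htr⟩, hc1, hc2⟩
      · -- phase 1
        rw [hp1]
        simp only [show ((1:Int) == 2) = false from rfl, show ((1:Int) == 1) = true from rfl,
          Bool.false_eq_true, if_false, if_true]
        by_cases hc : pvWs c
        · rw [if_neg (by simp [hc])]
          refine Or.inr ⟨p, pv_minOcc_concat hmin, Or.inl ⟨hp1, htr, hc1, hc2, ?_⟩⟩
          rw [hdropc]
          simp [List.all_append, hallws, hc]
        · rw [if_pos (by simp [hc])]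
          refine Or.inr ⟨p, pv_minOcc_concat hmin, Or.inr ⟨rfl, ⟨c, [], ?_, rfl⟩, ?_, ?_⟩⟩
          · rw [hdropc, List.dropWhile_append]
            rw [List.dropWhile_eq_nil_iff.mpr (by rw [List.all_eq_true] at hallws; exact hallws)]
            simp [List.dropWhile, hc]
          · rw [hdropc, List.count_append,
              pv_count_ws_zero '\'' (by decide) hallws]
            by_cases hq : c = '\'' <;> simp [hq, List.count_singleton, hc1]
          · rw [hdropc, List.count_append,
              pv_count_ws_zero '"' (by decide) hallws]
            by_cases hq : c = '"' <;> simp [hq, List.count_singleton, hc2]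
      · -- phase 2
        rw [hp2]
        simp only [show ((2:Int) == 2) = true from rfl, if_true]
        have hdw' : ((cs ++ [c]).drop (p + 5)).dropWhile pvWs = dh :: (dt ++ [c]) := by
          rw [hdropc, List.dropWhile_append, hdw]
          simp
        have hcnt : ∀ q : Char, ((cs ++ [c]).drop (p + 5)).count q = (cs.drop (p + 5)).count q + (if c = q then 1 else 0) := by
          intro q
          rw [hdropc, List.count_append]
          by_cases hq : c = q <;> simp [hq, List.count_singleton]
        by_cases hq1 : c = '\''
        · rw [if_pos (by simp [hq1])]
          refine Or.inr ⟨p, pv_minOcc_concat hmin, Or.inr ⟨rfl, ⟨dh, dt ++ [c], hdw', htr⟩, ?_, ?_⟩⟩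
          · rw [hcnt, if_pos hq1]; push_cast; omega
          · rw [hcnt, if_neg (by rw [hq1]; decide)]; push_cast; omega
        · by_cases hq2 : c = '"'
          · rw [if_neg (by simp [hq1]), if_pos (by simp [hq2])]
            refine Or.inr ⟨p, pv_minOcc_concat hmin, Or.inr ⟨rfl, ⟨dh, dt ++ [c], hdw', htr⟩, ?_, ?_⟩⟩
            · rw [hcnt, if_neg (by rw [hq2]; decide)]; push_cast; omega
            · rw [hcnt, if_pos hq2]; push_cast; omega
          · rw [if_neg (by simp [hq1]), if_neg (by simp [hq2])]
            refine Or.inr ⟨p, pv_minOcc_concat hmin, Or.inr ⟨hp2, ⟨dh, dt ++ [c], hdw', htr⟩, ?_, ?_⟩⟩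
            · rw [hcnt, if_neg hq1]; push_cast; omega
            · rw [hcnt, if_neg hq2]; push_cast; omega


theorem pv_inv_init : pvInv [] pvInitSt := by
  refine ⟨rfl, rfl, Or.inl ⟨rfl, rfl, rfl, rfl, ?_⟩⟩
  intro p hocc
  unfold pvOcc at hocc
  rw [List.drop_nil, List.prefix_nil] at hocc
  exact absurd hocc (by decide)

theorem pv_inv_machine (cs : List Char) (hdom : cs.all pvDomChar = true) :
    pvInv cs (cs.foldl pvStepB pvInitSt) := by
  induction cs using List.reverseRecOn with
  | nil => exact pv_inv_init
  | append_singleton cs c ih =>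
    simp only [List.all_append, List.all_cons, List.all_nil, Bool.and_true, Bool.and_eq_true] at hdom
    rw [List.foldl_append]
    exact pv_inv_step cs c _ hdom.2 (ih hdom.1)

theorem pv_beq_some (a b : Char) : ((some a == some b) : Bool) = (a == b) := by
  cases h : (a == b)
  · simp only [beq_eq_false_iff_ne, ne_eq] at h
    simp [h]
  · simp only [beq_iff_eq] at h
    simp [h]

theorem pv_nonws_mem_contra {l : List Char} (hall : l.all pvWs = true) {x : Char}
    (hx : x ∈ l) (hnw : pvWs x = false) : False := by
  rw [List.all_eq_true] at hall
  rw [hall x hx] at hnw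
  exact absurd hnw (by decide)

theorem pv_occ_lift (P S Q : List Char) (j : Nat) (h : pvFROM <+: S.drop j) :
    pvFROM <+: (P ++ (S ++ Q)).drop (P.length + j) := by
  have hj : j ≤ S.length := by
    by_contra hj
    rw [List.drop_eq_nil_of_le (by omega), List.prefix_nil] at h
    exact absurd h (by decide)
  rw [List.drop_append, List.drop_eq_nil_of_le (by omega), List.nil_append,
    show P.length + j - P.length = j from by omega, List.drop_append_of_le_length hj]
  exact h.trans (List.prefix_append _ _)

theorem pv_occ_restrict {S Q : List Char} {j : Nat} (h : pvFROM <+: S.drop j ++ Q)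
    (hlen : j + 5 ≤ S.length) : pvFROM <+: S.drop j := by
  rw [List.prefix_iff_eq_take] at h ⊢
  rw [List.take_append_of_le_length (by simp [List.length_drop, show pvFROM.length = 5 from rfl]; omega)] at h
  exact h

theorem pv_drop_mid (P S Q : List Char) (j : Nat) (hj : j ≤ S.length) :
    (P ++ (S ++ Q)).drop (P.length + j) = S.drop j ++ Q := by
  rw [List.drop_append, List.drop_eq_nil_of_le (by omega), List.nil_append,
    show P.length + j - P.length = j from by omega, List.drop_append_of_le_length hj]

-- position facts about an occurrence relative to the stripped slice
theorem pv_occ_ge (cs P S Q : List Char) (hcs : cs = P ++ (S ++ Q)) (hP : P.all pvWs = true)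
    {p : Nat} (hocc : pvOcc cs p) : P.length ≤ p := by
  by_contra hlt
  have hh := pvOcc_head hocc
  rw [hcs, List.drop_append, show p - P.length = 0 from by omega, List.drop_zero] at hh
  cases hPd : P.drop p with
  | nil =>
    have := congrArg List.length hPd
    simp [List.length_drop] at this
    omega
  | cons a t =>
    rw [hPd] at hh
    simp at hh
    subst hh
    exact pv_nonws_mem_contra hP (List.mem_of_mem_drop (hPd ▸ List.mem_cons_self)) (by decide)

theorem pv_occ_lt (cs P S Q : List Char) (hcs : cs = P ++ (S ++ Q)) (hQ : Q.all pvWs = true)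
    {p : Nat} {x : Char} (hx : x ∈ cs.drop (p + 5)) (hxnw : pvWs x = false) :
    p + 5 < P.length + S.length := by
  by_contra hge
  rw [hcs, List.drop_append, List.drop_eq_nil_of_le (by omega), List.nil_append,
    List.drop_append, List.drop_eq_nil_of_le (by omega), List.nil_append] at hx
  exact pv_nonws_mem_contra hQ (List.mem_of_mem_drop hx) hxnw

theorem pv_occ_strip_down (cs P S Q : List Char) (hcs : cs = P ++ (S ++ Q))
    (hP : P.all pvWs = true) (hQ : Q.all pvWs = true)
    {p : Nat} (hocc : pvOcc cs p) {x : Char} (hx : x ∈ cs.drop (p + 5)) (hxnw : pvWs x = false) :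
    P.length ≤ p ∧ pvFROM <+: S.drop (p - P.length) ∧ p - P.length + 5 < S.length := by
  have hge := pv_occ_ge cs P S Q hcs hP hocc
  have hlt := pv_occ_lt cs P S Q hcs hQ hx hxnw
  refine ⟨hge, ?_, by omega⟩
  have hd := pv_drop_mid P S Q (p - P.length) (by omega)
  rw [show P.length + (p - P.length) = p from by omega] at hd
  rw [pvOcc, hcs, hd] at hocc
  exact pv_occ_restrict hocc (by omega)

-- in phase 1 (everything after the first occurrence is whitespace) the stripped text
-- contains no occurrence at all
theorem pv_phase1_no_strip_occ (cs P S Q : List Char) (hcs : cs = P ++ (S ++ Q))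
    (hP : P.all pvWs = true) (hQ : Q.all pvWs = true)
    (hSlast : ∀ d, S.getLast? = some d → pvWs d = false)
    {p : Nat} (hmin : pvMinOcc cs p)
    (hall : (cs.drop (p + 5)).all pvWs = true) :
    ∀ j, ¬ pvFROM <+: S.drop j := by
  intro j hj
  have hocc_cs : pvOcc cs (P.length + j) := by rw [pvOcc, hcs]; exact pv_occ_lift P S Q j hj
  have hjlen : j + 5 ≤ S.length := pvOcc_length (cs := S) hj
  rcases lt_trichotomy (P.length + j) p with hlt | heq | hgt
  · exact hmin.2 _ hlt hocc_cs
  · -- the occurrence is the minimal one; the stripped text ends with a non-ws char after it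
    by_cases hje : j + 5 = S.length
    · -- occurrence flush with the end of S: S would end in ' '
      have hlen5 : (S.drop j).length = 5 := by simp [List.length_drop]; omega
      have hfe : pvFROM = S.drop j := hj.eq_of_length_le (by rw [hlen5]; decide)
      have hgl : (S.drop j).getLast? = S.getLast? := by
        rw [List.getLast?_drop, if_neg (by omega)]
      rw [← hfe] at hgl
      have := hSlast ' ' (by rw [← hgl]; decide)
      exact absurd this (by decide)
    · -- a non-ws char (the last of S) sits after the occurrence, inside the all-ws tail
      have hSne : S.getLast?.isSome := by
        cases hgl : S.getLast? with
        | none => rw [List.getLast?_eq_none_iff] at hgl; subst hgl; simp at hjlen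
        | some d => rfl
      obtain ⟨d, hgl⟩ := Option.isSome_iff_exists.mp hSne
      have hdnw := hSlast d hgl
      have hdmem : d ∈ S.drop (j + 5) := by
        apply List.mem_of_getLast?
        rw [List.getLast?_drop, if_neg (by omega)]
        exact hgl
      have hdcs : d ∈ cs.drop (p + 5) := by
        rw [← heq, hcs, show P.length + j + 5 = P.length + (j + 5) from by omega,
          pv_drop_mid _ _ _ _ (by omega)]
        exact List.mem_append_left _ hdmem
      exact pv_nonws_mem_contra hall hdcs hdnw
  · rcases Nat.lt_or_ge (P.length + j) (p + 5) with hlt5 | hge5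
    · exact pv_no_overlap hmin.1 hocc_cs hgt hlt5
    · have hh := pvOcc_head hocc_cs
      have hf : 'f' ∈ cs.drop (P.length + j) := List.mem_of_head? hh
      have h2 : cs.drop (P.length + j) = (cs.drop (p + 5)).drop (P.length + j - (p + 5)) := by
        rw [List.drop_drop]; congr 1; omega
      rw [h2] at hf
      exact pv_nonws_mem_contra hall (List.mem_of_mem_drop hf) (by decide)

theorem pv_done_of_inv (cs : List Char) (st : PvScanSt) (h : pvInv cs st) :
    pvDoneB st = pvIsImportComplete (String.ofList cs) := by
  obtain ⟨hw, hlast, hph⟩ := h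
  unfold pvIsImportComplete pvDoneB
  simp only [PySem.Str.strip, PySem.Str.endswith, PySem.Str.isIn, PySem.Str.splitMax?,
    PySem.Str.startswith, PySem.Str.count, String.toList_ofList,
    show (";" : String).toList = [';'] from rfl,
    show ("from " : String).toList = pvFROM from rfl,
    pv_endswith_single, pv_getLast?_strip]
  have hiff : (st.last == [';']) = ((List.filter (fun c => !pvWs c) cs).getLast? == some ';') := by
    cases hgl : (List.filter (fun c => !pvWs c) cs).getLast? with
    | none => rw [hgl] at hlast; simp only at hlast; rw [hlast]; simp
    | some d => rw [hgl] at hlast; simp only at hlast; rw [hlast]; simp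
  rw [hiff]
  obtain ⟨P, Q, hcs0, hP, hQ⟩ := pv_strip_decomp cs
  rw [List.append_assoc] at hcs0
  rcases hph with ⟨hp0, htr, hc1, hc2, hno⟩ | ⟨p, hmin, hsub⟩
  · -- phase 0: no occurrence anywhere, hence none in the stripped text
    have hisIn : PySem.Chars.isIn pvFROM (PySem.Chars.strip cs) = false := by
      rw [← Bool.not_eq_true, ← PySem.Chars.exists_prefix_drop_iff_isIn]
      rintro ⟨j, hj⟩
      exact hno (P.length + j) (by rw [pvOcc, hcs0]; exact pv_occ_lift P _ Q j hj)
    rw [hp0, hisIn]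
    simp
  · have hSlast : ∀ d, (PySem.Chars.strip cs).getLast? = some d → pvWs d = false :=
      fun d hd => pv_strip_getLast hd
    rcases hsub with ⟨hp1, htr, hc1, hc2, hallws⟩ | ⟨hp2, ⟨dh, dt, hdw, htr⟩, hc1, hc2⟩
    · -- phase 1: the only occurrence is followed by whitespace only, so the
      -- stripped text contains no occurrence
      have hisIn : PySem.Chars.isIn pvFROM (PySem.Chars.strip cs) = false := by
        rw [← Bool.not_eq_true, ← PySem.Chars.exists_prefix_drop_iff_isIn]
        rintro ⟨j, hj⟩
        exact pv_phase1_no_strip_occ cs P _ Q hcs0 hP hQ hSlast hmin hallws j hj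
      rw [hp1, hisIn]
      simp
    · -- phase 2
      have hdh_nw : pvWs dh = false := pv_dropWhile_head hdw
      have hdh_mem : dh ∈ cs.drop (p + 5) :=
        (List.dropWhile_suffix pvWs).subset (hdw ▸ List.mem_cons_self)
      obtain ⟨hge, hjocc, hjlt⟩ := pv_occ_strip_down cs P _ Q hcs0 hP hQ hmin.1 hdh_mem hdh_nw
      have hjmin : ∀ q < p - P.length, ¬ pvFROM <+: (PySem.Chars.strip cs).drop q := by
        intro q hq hocc'
        exact hmin.2 (P.length + q) (by omega)
          (by rw [pvOcc, hcs0]; exact pv_occ_lift P _ Q q hocc')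
      have hisIn : PySem.Chars.isIn pvFROM (PySem.Chars.strip cs) = true := by
        rw [← PySem.Chars.exists_prefix_drop_iff_isIn]
        exact ⟨p - P.length, hjocc⟩
      have hsplit : PySem.Chars.splitMax? (PySem.Chars.strip cs) pvFROM 1 =
          some [(PySem.Chars.strip cs).take (p - P.length),
                (PySem.Chars.strip cs).drop (p - P.length + 5)] := by
        rw [PySem.Chars.splitMax?, if_neg (by decide)]
        rw [pv_splitOnMax_occ _ pvFROM (by decide) (p - P.length) hjocc hjmin]
        rfl
      rw [hsplit, hp2, hisIn]
      simp only [Option.map_some, List.map_cons, List.map_nil, Option.getD_some,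
        show ∀ (x y : String), PySem.List.pyGet? [x, y] (-1) = some y from fun x y => rfl,
        String.toList_ofList, pv_startswith_single, pv_count_single,
        show ("'" : String).toList = ['\''] from rfl,
        show ("\"" : String).toList = ['"'] from rfl]
      -- the trailing text: strip of everything after the first occurrence in the stripped text
      set S := PySem.Chars.strip cs with hS
      set t₁ := S.drop (p - P.length + 5) with ht₁
      have ht : cs.drop (p + 5) = t₁ ++ Q := by
        rw [hcs0, show p + 5 = P.length + (p - P.length + 5) from by omega,
          pv_drop_mid _ _ _ _ (by omega)]
      -- t₁ is nonempty and ends in the last (non-ws) char of S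
      have hglS : t₁.getLast? = S.getLast? := by
        rw [ht₁, List.getLast?_drop, if_neg (by omega)]
      have hSne : ∃ d, S.getLast? = some d := by
        cases hgl : S.getLast? with
        | none => rw [List.getLast?_eq_none_iff] at hgl; rw [hgl] at hjlt; simp at hjlt
        | some d => exact ⟨d, rfl⟩
      obtain ⟨dS, hglS'⟩ := hSne
      have hdSnw : pvWs dS = false := hSlast dS hglS'
      have hdw₁ : t₁.dropWhile pvWs ≠ [] := by
        intro hnil
        rw [List.dropWhile_eq_nil_iff] at hnil
        have : dS ∈ t₁ := List.mem_of_getLast? (hglS.trans hglS')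
        rw [hnil dS this] at hdSnw
        exact absurd hdSnw (by decide)
      have hdwt : (cs.drop (p + 5)).dropWhile pvWs = t₁.dropWhile pvWs ++ Q := by
        rw [ht, List.dropWhile_append, if_neg (by simpa [List.isEmpty_iff] using hdw₁)]
      -- so the head of dropWhile over t₁ is dh
      have hhead₁ : (t₁.dropWhile pvWs).head? = some dh := by
        cases hx : t₁.dropWhile pvWs with
        | nil => exact absurd hx hdw₁
        | cons a b =>
          rw [hdwt, hx] at hdw
          simp at hdw
          simp [hdw.1]
      -- trailing = strip t₁ has head dh and the same quote counts as cs.drop (p+5)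
      have hlt₁ : PySem.Chars.lstrip t₁ = t₁.dropWhile pvWs := rfl
      have hstne : PySem.Chars.strip t₁ ≠ [] := by
        intro hnil
        rw [PySem.Chars.strip] at hnil
        obtain ⟨Q₁, hq1, hq2⟩ := pv_rstrip_decomp (PySem.Chars.lstrip t₁)
        rw [hnil, List.nil_append] at hq1
        have : dh ∈ PySem.Chars.lstrip t₁ := by
          rw [hlt₁]; exact List.mem_of_head? hhead₁
        rw [hq1] at this
        exact pv_nonws_mem_contra hq2 this hdh_nw
      have hsthead : (PySem.Chars.strip t₁).head? = some dh := by
        show (PySem.Chars.rstrip (PySem.Chars.lstrip t₁)).head? = some dh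
        rw [← pv_head?_of_prefix (pv_rstrip_prefix (PySem.Chars.lstrip t₁)) hstne]
        rw [hlt₁]
        exact hhead₁
      have hstcount : ∀ q : Char, pvWs q = false →
          (PySem.Chars.strip t₁).count q = (cs.drop (p + 5)).count q := by
        intro q hqnw
        obtain ⟨P₁, Q₁, hd1, hp1', hq1'⟩ := pv_strip_decomp t₁
        have h1 : t₁.count q = (PySem.Chars.strip t₁).count q := by
          have h2 := congrArg (List.count q) hd1
          rw [List.count_append, List.count_append,
            pv_count_ws_zero q hqnw hp1', pv_count_ws_zero q hqnw hq1'] at h2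
          omega
        rw [← h1, ht, List.count_append, pv_count_ws_zero q hqnw hQ]
        omega
      rw [htr, hsthead, hstcount '\'' (by decide), hstcount '"' (by decide)]
      rw [hc1, hc2]
      simp only [show ((2:Int) == 2) = true from rfl, Bool.true_and]
      have hdec : ∀ n : Nat, decide (2 ≤ (n : Int)) = decide (2 ≤ n) := by
        intro n; simp
      rw [hdec, hdec]
      have hbeq : ∀ a b : Char, (([a] : List Char) == [b]) = (a == b) := by
        intro a b
        show List.beq [a] [b] = (a == b)
        simp [List.beq]
      rw [show (([dh] : List Char) == ['\'']) = (dh == '\'') from hbeq dh '\'',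
        show (([dh] : List Char) == ['"']) = (dh == '"') from hbeq dh '"']
      rw [pv_beq_some dh '\'', pv_beq_some dh '"']
      by_cases hC : (((List.filter (fun c => !pvWs c) cs).getLast? == some ';') = true)
      · rw [if_pos hC, if_pos hC]
      · rw [if_neg hC, if_neg hC, if_neg (by decide)]
        cases hX : (dh == '\'' && decide (2 ≤ List.count '\'' (List.drop (p + 5) cs)) ||
            dh == '"' && decide (2 ≤ List.count '"' (List.drop (p + 5) cs)))
        · rw [if_neg (fun hcon => Bool.false_ne_true hcon)]
        · rw [if_pos rfl]

theorem pv_done_eq (cs : List Char) (hdom : cs.all pvDomChar = true) :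
    pvDoneB (cs.foldl pvStepB pvInitSt) = pvIsImportComplete (String.ofList cs) :=
  pv_done_of_inv cs _ (pv_inv_machine cs hdom)

theorem pv_pyGet?_mem {α : Type} (xs : List α) (i : Int) (x : α)
    (h : PySem.List.pyGet? xs i = some x) : x ∈ xs := by
  unfold PySem.List.pyGet? at h
  cases hk : PySem.List.pyIdx? xs.length i with
  | none => rw [hk] at h; simp at h
  | some k => rw [hk] at h; simp at h; exact List.mem_of_getElem? h
theorem pv_join_nil_flatten (xs : List (List Char)) :
    PySem.Chars.join [] xs = xs.flatten := by
  induction xs with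
  | nil => simp [PySem.Chars.join_nil]
  | cons p rest ih =>
    cases rest with
    | nil => simp [PySem.Chars.join_singleton]
    | cons q r => rw [PySem.Chars.join_cons_cons]; simp at ih ⊢; rw [ih]

theorem pv_loop_eq (lines : List String) (hdom : lines.all pvDomStr = true) :
    ∀ acc idx, acc.all pvDomStr = true →
      pvLoopB lines acc (((acc.map String.toList).flatten).foldl pvStepB pvInitSt) idx =
      pvLoopA lines acc idx := by
  intro acc idx
  fun_induction pvLoopA lines acc idx with
  | case1 acc idx hdone =>
    intro hacc
    rw [pvLoopB]
    have hj : (PySem.Str.join "" acc) = String.ofList ((acc.map String.toList).flatten) := by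
      unfold PySem.Str.join
      rw [show ("" : String).toList = [] from rfl, pv_join_nil_flatten]
    have hd : ((acc.map String.toList).flatten).all pvDomChar = true := by
      simp only [List.all_eq_true] at hacc ⊢
      intro c hc
      rw [List.mem_flatten] at hc
      obtain ⟨t, ht, hct⟩ := hc
      rw [List.mem_map] at ht
      obtain ⟨s, hs, rfl⟩ := ht
      have := hacc s hs
      unfold pvDomStr at this
      simp only [List.all_eq_true] at this
      exact this c hct
    rw [pv_done_eq _ hd, ← hj, if_pos hdone]
  | case2 acc idx hdone h2 =>
    intro hacc
    rw [pvLoopB]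
    have hj : (PySem.Str.join "" acc) = String.ofList ((acc.map String.toList).flatten) := by
      unfold PySem.Str.join
      rw [show ("" : String).toList = [] from rfl, pv_join_nil_flatten]
    have hd : ((acc.map String.toList).flatten).all pvDomChar = true := by
      simp only [List.all_eq_true] at hacc ⊢
      intro c hc
      rw [List.mem_flatten] at hc
      obtain ⟨t, ht, hct⟩ := hc
      rw [List.mem_map] at ht
      obtain ⟨s, hs, rfl⟩ := ht
      have := hacc s hs
      unfold pvDomStr at this
      simp only [List.all_eq_true] at this
      exact this c hct
    rw [pv_done_eq _ hd, ← hj, if_neg hdone, dif_pos h2]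
  | case3 acc idx hdone h2 l hget ih =>
    intro hacc
    rw [pvLoopB]
    have hj : (PySem.Str.join "" acc) = String.ofList ((acc.map String.toList).flatten) := by
      unfold PySem.Str.join
      rw [show ("" : String).toList = [] from rfl, pv_join_nil_flatten]
    have hd : ((acc.map String.toList).flatten).all pvDomChar = true := by
      simp only [List.all_eq_true] at hacc ⊢
      intro c hc
      rw [List.mem_flatten] at hc
      obtain ⟨t, ht, hct⟩ := hc
      rw [List.mem_map] at ht
      obtain ⟨s, hs, rfl⟩ := ht
      have := hacc s hs
      unfold pvDomStr at this
      simp only [List.all_eq_true] at this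
      exact this c hct
    rw [pv_done_eq _ hd, ← hj, if_neg hdone, dif_neg h2, hget]
    have hl : pvDomStr l = true := by
      have hm := pv_pyGet?_mem _ _ _ hget
      simp only [List.all_eq_true] at hdom
      exact hdom l hm
    have hscan : ((acc ++ [l]).map String.toList).flatten.foldl pvStepB pvInitSt =
        pvScanB (((acc.map String.toList).flatten).foldl pvStepB pvInitSt) l := by
      rw [List.map_append, List.flatten_append]
      simp [pvScanB, List.foldl_append]
    have hUp := ih (by simp [List.all_append, hacc, hl])
    rw [hscan] at hUp
    exact hUp
  | case4 acc idx hdone h2 hget =>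
    intro hacc
    rw [pvLoopB]
    have hj : (PySem.Str.join "" acc) = String.ofList ((acc.map String.toList).flatten) := by
      unfold PySem.Str.join
      rw [show ("" : String).toList = [] from rfl, pv_join_nil_flatten]
    have hd : ((acc.map String.toList).flatten).all pvDomChar = true := by
      simp only [List.all_eq_true] at hacc ⊢
      intro c hc
      rw [List.mem_flatten] at hc
      obtain ⟨t, ht, hct⟩ := hc
      rw [List.mem_map] at ht
      obtain ⟨s, hs, rfl⟩ := ht
      have := hacc s hs
      unfold pvDomStr at this
      simp only [List.all_eq_true] at this
      exact this c hct
    rw [pv_done_eq _ hd, ← hj, if_neg hdone, dif_neg h2, hget]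


-- ===== VERDICT (by name: the statement is the Claim_ definition above) =====
theorem collect_import_statement_py_spec : Claim_equal_collect_import_statement_py := by
  intro lines start hdom hpre
  unfold Spec_collect_import_statement_py collect_import_statement_py collect_import_statement_py_alt
  have hlines : lines.all pvDomStr = true := by
    unfold Dom_collect_import_statement_py at hdom
    rw [Bool.and_eq_true] at hdom
    exact hdom.1
  cases hget : PySem.List.pyGet? lines start with
  | none => rfl
  | some first =>
    have hfirst : pvDomStr first = true := by
      rw [List.all_eq_true] at hlines
      exact hlines first (pv_pyGet?_mem _ _ _ hget)
    have h := pv_loop_eq lines hlines [first] start (by simp [hfirst])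
    simp only [List.map_cons, List.map_nil, List.flatten_cons, List.flatten_nil, List.append_nil] at h
    exact h.symm
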